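-- pv_equiv track=rewrite | github.com/PC-Thien-TS/ai-test-system | orchestrator/adapters/ecommerce_alpha/risk_rules.py | map_defect_to_flows
-- ===== SOURCE A (Python) =====
-- def map_defect_to_flows(finding_id: str, title: str) -> list[str]:
--     text = f"{finding_id} {title}".lower()
--     flows: list[str] = []
--     if any(token in text for token in ("auth", "foundation", "login", "token",)):
--         flows.append("auth_foundation")
--     if any(token in text for token in ("catalog", "discovery", "search",)):
--         flows.append("catalog_discovery")
--     if any(token in text for token in ("cart", "checkout", "order",)):
--         flows.append("cart_checkout")
--     if any(token in text for token in ("fulfillment", "management", "order", "shipment",)):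
--         flows.append("order_management")
--     if any(token in text for token in ("billing", "integrity", "payment", "transaction",)):
--         flows.append("payment_integrity")
--     if any(token in text for token in ("admin", "console", "ops",)):
--         flows.append("admin_ops")
--     return sorted(set(flows))
-- ===== SOURCE B (Python) =====
-- TOKEN_LABELS = [
--     ("auth", ("auth_foundation",)),
--     ("foundation", ("auth_foundation",)),
--     ("login", ("auth_foundation",)),
--     ("token", ("auth_foundation",)),
--     ("catalog", ("catalog_discovery",)),
--     ("discovery", ("catalog_discovery",)),
--     ("search", ("catalog_discovery",)),
--     ("cart", ("cart_checkout",)),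
--     ("checkout", ("cart_checkout",)),
--     ("order", ("cart_checkout", "order_management")),
--     ("fulfillment", ("order_management",)),
--     ("management", ("order_management",)),
--     ("shipment", ("order_management",)),
--     ("billing", ("payment_integrity",)),
--     ("integrity", ("payment_integrity",)),
--     ("payment", ("payment_integrity",)),
--     ("transaction", ("payment_integrity",)),
--     ("admin", ("admin_ops",)),
--     ("console", ("admin_ops",)),
--     ("ops", ("admin_ops",)),
-- ]
--
-- def map_defect_to_flows(finding_id: str, title: str) -> list[str]:
--     # Positional scan: at every start position of the lowercased text, look up the
--     # tokens (via an inverted token -> flow-labels index) that begin there and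
--     # accumulate their labels in a set.  A label is collected iff one of its
--     # tokens occurs somewhere in the text, exactly the original classification.
--     text = f"{finding_id} {title}".lower()
--     hits: set[str] = set()
--     for i in range(len(text)):
--         for token, labels in TOKEN_LABELS:
--             if text.startswith(token, i):
--                 hits.update(labels)
--     return sorted(hits)
-- ===== Notes on version B (the rewrite author's own statement) =====
-- stated objective: alternative
-- what changed: Replaces the six per-label any(token in text) substring searches by a single positional scan of the text that matches tokens from an inverted token-to-labels index at each start position, accumulating flow labels directly in a set.
import Mathlib
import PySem

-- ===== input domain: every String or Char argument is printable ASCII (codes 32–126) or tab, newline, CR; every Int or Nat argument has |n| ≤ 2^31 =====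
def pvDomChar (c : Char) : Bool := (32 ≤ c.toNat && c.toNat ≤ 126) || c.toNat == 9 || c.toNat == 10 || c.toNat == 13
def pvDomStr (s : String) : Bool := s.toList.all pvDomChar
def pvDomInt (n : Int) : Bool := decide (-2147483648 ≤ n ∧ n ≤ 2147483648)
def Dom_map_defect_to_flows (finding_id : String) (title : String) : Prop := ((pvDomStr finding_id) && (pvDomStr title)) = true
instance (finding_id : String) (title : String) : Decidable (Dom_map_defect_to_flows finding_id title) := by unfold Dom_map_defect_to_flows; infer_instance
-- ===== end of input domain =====

-- B replaces A's six per-label any-substring checks by one positional scan of the text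
-- against an inverted token -> flow-labels index, accumulating labels in a set (alternative; same cost).

-- ===== PORT A =====
-- text = f"{finding_id} {title}".lower(), kept as List Char (exact for 'in' and .lower on strings)
def map_defect_to_flows (finding_id : String) (title : String) : List String :=
  let text : List Char := PySem.Chars.lower (finding_id.toList ++ ' ' :: title.toList)
  let flows : List String := []
  let flows := if ["auth", "foundation", "login", "token"].any (fun tok => PySem.Chars.isIn tok.toList text) then flows ++ ["auth_foundation"] else flows
  let flows := if ["catalog", "discovery", "search"].any (fun tok => PySem.Chars.isIn tok.toList text) then flows ++ ["catalog_discovery"] else flows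
  let flows := if ["cart", "checkout", "order"].any (fun tok => PySem.Chars.isIn tok.toList text) then flows ++ ["cart_checkout"] else flows
  let flows := if ["fulfillment", "management", "order", "shipment"].any (fun tok => PySem.Chars.isIn tok.toList text) then flows ++ ["order_management"] else flows
  let flows := if ["billing", "integrity", "payment", "transaction"].any (fun tok => PySem.Chars.isIn tok.toList text) then flows ++ ["payment_integrity"] else flows
  let flows := if ["admin", "console", "ops"].any (fun tok => PySem.Chars.isIn tok.toList text) then flows ++ ["admin_ops"] else flows
  PySem.List.sorted (PySem.Set.ofList flows) (fun x => x) false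

-- ===== PORT B =====
-- the module-level inverted index TOKEN_LABELS of Source B
def TOKEN_LABELS : List (String × List String) :=
  [ ("auth", ["auth_foundation"]),
    ("foundation", ["auth_foundation"]),
    ("login", ["auth_foundation"]),
    ("token", ["auth_foundation"]),
    ("catalog", ["catalog_discovery"]),
    ("discovery", ["catalog_discovery"]),
    ("search", ["catalog_discovery"]),
    ("cart", ["cart_checkout"]),
    ("checkout", ["cart_checkout"]),
    ("order", ["cart_checkout", "order_management"]),
    ("fulfillment", ["order_management"]),
    ("management", ["order_management"]),
    ("shipment", ["order_management"]),
    ("billing", ["payment_integrity"]),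
    ("integrity", ["payment_integrity"]),
    ("payment", ["payment_integrity"]),
    ("transaction", ["payment_integrity"]),
    ("admin", ["admin_ops"]),
    ("console", ["admin_ops"]),
    ("ops", ["admin_ops"]) ]

-- text.startswith(token, i) for 0 ≤ i ≤ len(text) is exactly PySem.Chars.startswith (text.drop i) token;
-- range(len(text)) is List.range text.length (the length is a Nat).
def map_defect_to_flows_alt (finding_id : String) (title : String) : List String :=
  let text : List Char := PySem.Chars.lower (finding_id.toList ++ ' ' :: title.toList)
  let hits : PySem.Set String :=
    (List.range text.length).foldl
      (fun acc i =>
        TOKEN_LABELS.foldl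
          (fun acc p =>
            if PySem.Chars.startswith (text.drop i) p.1.toList then PySem.Set.update acc p.2 else acc)
          acc)
      PySem.Set.empty
  PySem.List.sorted hits (fun x => x) false

-- ===== PRECONDITION & SPEC =====
def Spec_map_defect_to_flows (finding_id : String) (title : String) (out : List String) : Prop := out = map_defect_to_flows_alt finding_id title
instance (finding_id : String) (title : String) (out : List String) : Decidable (Spec_map_defect_to_flows finding_id title out) := by unfold Spec_map_defect_to_flows; infer_instance

-- ===== CLAIM (what is proved, stated in full; the proofs are below) =====
def Claim_equal_map_defect_to_flows : Prop := ∀ (finding_id : String) (title : String), Dom_map_defect_to_flows finding_id title → Spec_map_defect_to_flows finding_id title (map_defect_to_flows finding_id title)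

-- ===== LEMMAS AND PROOFS =====

-- sorted (ascending, identity key) of two duplicate-free lists with the same members is the same list
theorem pv_sorted_set_congr (s1 s2 : List String) (h1 : s1.Nodup) (h2 : s2.Nodup)
    (h : ∀ y, y ∈ s1 ↔ y ∈ s2) :
    PySem.List.sorted s1 (fun x => x) false = PySem.List.sorted s2 (fun x => x) false := by
  have hperm : s1.Perm s2 := (List.perm_ext_iff_of_nodup h1 h2).mpr h
  have hp1 : (PySem.List.sorted s1 (fun x => x) false).Perm s1 := PySem.List.sorted_perm s1 (fun x => x) false
  have hpair : (PySem.List.sorted s1 (fun x => x) false).Pairwise (fun a b => a ≤ b) :=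
    PySem.List.sorted_pairwise s1 (fun x => x)
  have hnd : (PySem.List.sorted s1 (fun x => x) false).Nodup := hp1.nodup_iff.mpr h1
  have hlt : (PySem.List.sorted s1 (fun x => x) false).Pairwise (fun a b => a < b) :=
    (hpair.and hnd).imp (fun hab => lt_of_le_of_ne hab.1 hab.2)
  exact (PySem.List.sorted_eq_of_perm_of_pairwise_lt _ _ (fun x => x) (hp1.trans hperm) hlt).symm

theorem pv_mem_ite_append (y x : String) (c : Prop) [Decidable c] (l : List String) :
    (y ∈ if c then l ++ [x] else l) ↔ y ∈ l ∨ (c ∧ y = x) := by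
  split_ifs with hc <;> simp [hc]

theorem pv_mem_foldl_if_update {α : Type} (Q : α × List String → Bool)
    (l : List (α × List String)) (acc : PySem.Set String) (y : String) :
    (y ∈ l.foldl (fun acc p => if Q p then PySem.Set.update acc p.2 else acc) acc) ↔
      y ∈ acc ∨ ∃ p ∈ l, Q p = true ∧ y ∈ p.2 := by
  induction l generalizing acc with
  | nil => simp
  | cons p l ih =>
    simp only [List.foldl_cons]
    by_cases h : Q p = true <;> · rw [ih]; simp [h, PySem.Set.mem_update]; try tauto

theorem pv_mem_foldl_gen {β : Type} (step : PySem.Set String → β → PySem.Set String)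
    (C : β → String → Prop)
    (hstep : ∀ acc i y, (y ∈ step acc i) ↔ y ∈ acc ∨ C i y) :
    ∀ (l : List β) (acc : PySem.Set String) (y : String),
      (y ∈ l.foldl step acc) ↔ y ∈ acc ∨ ∃ i ∈ l, C i y := by
  intro l
  induction l with
  | nil => simp
  | cons i l ih =>
    intro acc y
    simp only [List.foldl_cons, ih, hstep, List.mem_cons, exists_eq_or_imp]
    tauto

theorem pv_nodup_foldl_gen {β : Type} (step : PySem.Set String → β → PySem.Set String)
    (hstep : ∀ acc i, acc.Nodup → (step acc i).Nodup) :
    ∀ (l : List β) (acc : PySem.Set String), acc.Nodup → (l.foldl step acc).Nodup := by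
  intro l
  induction l with
  | nil => intro acc h; exact h
  | cons i l ih => intro acc h; exact ih _ (hstep _ _ h)

theorem pv_exists_range_prefix_iff (tok : List Char) (htok : tok ≠ []) (text : List Char) :
    (∃ i ∈ List.range text.length, PySem.Chars.startswith (text.drop i) tok = true) ↔
      PySem.Chars.isIn tok text = true := by
  rw [← PySem.Chars.exists_prefix_drop_iff_isIn]
  constructor
  · rintro ⟨i, _, h⟩; exact ⟨i, (PySem.Chars.startswith_iff _ _).mp h⟩
  · rintro ⟨j, hj⟩
    have hjlt : j < text.length := by
      rcases Nat.lt_or_ge j text.length with h | h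
      · exact h
      · rw [List.drop_eq_nil_of_le h] at hj
        exact absurd (List.prefix_nil.mp hj) htok
    exact ⟨j, List.mem_range.mpr hjlt, (PySem.Chars.startswith_iff _ _).mpr hj⟩

theorem pv_scan_iff (text : List Char) (y : String) :
    (∃ i ∈ List.range text.length, ∃ p ∈ TOKEN_LABELS,
        PySem.Chars.startswith (text.drop i) p.1.toList = true ∧ y ∈ p.2) ↔
      ∃ p ∈ TOKEN_LABELS, PySem.Chars.isIn p.1.toList text = true ∧ y ∈ p.2 := by
  have hne : ∀ p ∈ TOKEN_LABELS, p.1.toList ≠ ([] : List Char) := by decide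
  constructor
  · rintro ⟨i, hi, p, hp, hsw, hy⟩
    exact ⟨p, hp, (pv_exists_range_prefix_iff _ (hne p hp) text).mp ⟨i, hi, hsw⟩, hy⟩
  · rintro ⟨p, hp, hin, hy⟩
    obtain ⟨i, hi, hsw⟩ := (pv_exists_range_prefix_iff _ (hne p hp) text).mpr hin
    exact ⟨i, hi, p, hp, hsw, hy⟩

set_option maxHeartbeats 2000000 in
theorem pv_core (text : List Char) :
    (let flows : List String := []
     let flows := if ["auth", "foundation", "login", "token"].any (fun tok => PySem.Chars.isIn tok.toList text) then flows ++ ["auth_foundation"] else flows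
     let flows := if ["catalog", "discovery", "search"].any (fun tok => PySem.Chars.isIn tok.toList text) then flows ++ ["catalog_discovery"] else flows
     let flows := if ["cart", "checkout", "order"].any (fun tok => PySem.Chars.isIn tok.toList text) then flows ++ ["cart_checkout"] else flows
     let flows := if ["fulfillment", "management", "order", "shipment"].any (fun tok => PySem.Chars.isIn tok.toList text) then flows ++ ["order_management"] else flows
     let flows := if ["billing", "integrity", "payment", "transaction"].any (fun tok => PySem.Chars.isIn tok.toList text) then flows ++ ["payment_integrity"] else flows
     let flows := if ["admin", "console", "ops"].any (fun tok => PySem.Chars.isIn tok.toList text) then flows ++ ["admin_ops"] else flows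
     PySem.List.sorted (PySem.Set.ofList flows) (fun x => x) false)
    =
    (let hits : PySem.Set String :=
      (List.range text.length).foldl
        (fun acc i =>
          TOKEN_LABELS.foldl
            (fun acc p =>
              if PySem.Chars.startswith (text.drop i) p.1.toList then PySem.Set.update acc p.2 else acc)
            acc)
        PySem.Set.empty
     PySem.List.sorted hits (fun x => x) false) := by
  apply pv_sorted_set_congr
  · exact PySem.Set.nodup_ofList _
  · apply pv_nodup_foldl_gen _ _ _ _ List.nodup_nil
    intro acc i hacc
    apply pv_nodup_foldl_gen _ _ _ _ hacc
    intro acc' p hacc'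
    split_ifs with h
    · exact PySem.Set.nodup_update _ _ hacc'
    · exact hacc'
  · intro y
    rw [PySem.Set.mem_ofList,
      pv_mem_foldl_gen _ (fun i y => ∃ p ∈ TOKEN_LABELS, PySem.Chars.startswith (text.drop i) p.1.toList = true ∧ y ∈ p.2)
        (fun acc i y => pv_mem_foldl_if_update (fun p => PySem.Chars.startswith (text.drop i) p.1.toList) TOKEN_LABELS acc y)]
    simp only [PySem.Set.empty]
    rw [show ∀ (P : Prop), (y ∈ ([] : List String) ∨ P) ↔ P from fun P => by simp]
    rw [pv_scan_iff text y]
    simp only [pv_mem_ite_append, List.not_mem_nil, false_or, TOKEN_LABELS,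
      List.any_cons, List.any_nil, Bool.or_eq_true, List.mem_cons,
      exists_eq_or_imp, exists_eq_left, or_false, false_or]
    by_cases h1 : y = "auth_foundation"
    · subst h1; simp
    by_cases h2 : y = "catalog_discovery"
    · subst h2; simp
    by_cases h3 : y = "cart_checkout"
    · subst h3; simp
    by_cases h4 : y = "order_management"
    · subst h4; simp; all_goals tauto
    by_cases h5 : y = "payment_integrity"
    · subst h5; simp
    by_cases h6 : y = "admin_ops"
    · subst h6; simp
    simp [h1, h2, h3, h4, h5, h6]

-- ===== VERDICT (by name: the statement is the Claim_ definition above) =====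
theorem map_defect_to_flows_spec : Claim_equal_map_defect_to_flows := by
  intro finding_id title _
  unfold Spec_map_defect_to_flows map_defect_to_flows map_defect_to_flows_alt
  exact pv_core (PySem.Chars.lower (finding_id.toList ++ ' ' :: title.toList))
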